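-- pv_equiv track=rewrite | github.com/vivalabit/swiss-it-jobs-analytics | swiss_jobs/providers/jobup_ch/extractors.py | _format_workload
-- ===== SOURCE A (Python) =====
-- from typing import Any
--
-- def _format_workload(value: Any) -> str:
--     if not isinstance(value, list) or not value:
--         return ""
--     normalized = [item for item in value if isinstance(item, int)]
--     if not normalized:
--         return ""
--     low = min(normalized)
--     high = max(normalized)
--     if low == high:
--         return f"{low}%"
--     return f"{low}% - {high}%"
-- ===== SOURCE B (Python) =====
-- from typing import Any
--
-- def _format_workload(value: Any) -> str:
--     if not isinstance(value, list):
--         return ""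
--     ordered = sorted(item for item in value if isinstance(item, int))
--     if not ordered:
--         return ""
--     low, high = ordered[0], ordered[-1]
--     return f"{low}%" if low == high else f"{low}% - {high}%"
-- ===== Notes on version B (the rewrite author's own statement) =====
-- stated objective: alternative
-- what changed: Instead of computing min() and max() over the filtered list, B sorts the filtered values once and reads the range endpoints off the sorted list's first and last positions.
import Mathlib
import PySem

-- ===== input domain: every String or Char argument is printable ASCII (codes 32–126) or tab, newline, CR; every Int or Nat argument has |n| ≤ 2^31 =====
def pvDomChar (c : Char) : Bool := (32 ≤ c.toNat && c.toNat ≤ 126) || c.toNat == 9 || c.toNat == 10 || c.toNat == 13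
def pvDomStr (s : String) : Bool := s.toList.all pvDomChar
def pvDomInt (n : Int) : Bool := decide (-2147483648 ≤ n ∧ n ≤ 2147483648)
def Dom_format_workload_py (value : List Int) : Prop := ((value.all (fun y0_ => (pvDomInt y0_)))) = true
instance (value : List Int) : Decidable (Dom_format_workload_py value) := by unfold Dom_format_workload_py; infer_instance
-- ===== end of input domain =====

-- B sorts the filtered values once and reads the range endpoints off the first and
-- last positions of the sorted list, instead of A's min()/max() passes (alternative).


-- ===== PORT A =====
-- isinstance(value, list) is always true under the type convention; the
-- isinstance(item, int) filter keeps every element of a List Int.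
def format_workload_py (value : List Int) : String :=
  if value.isEmpty then ""
  else
    let normalized := value.filter (fun _ => true)
    if normalized.isEmpty then ""
    else
      match PySem.List.min? normalized (fun x => x), PySem.List.max? normalized (fun x => x) with
      | some low, some high =>
          if low == high then PySem.Int.toStr low ++ "%"
          else PySem.Int.toStr low ++ "% - " ++ PySem.Int.toStr high ++ "%"
      | _, _ => ""

-- ===== PORT B =====
-- sort the filtered values once, then read the endpoints at positions 0 and -1
def format_workload_py_alt (value : List Int) : String :=
  let ordered := PySem.List.sorted (value.filter (fun _ => true)) (fun x => x) false
  if ordered.isEmpty then ""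
  else
    let low := PySem.List.pyGetD ordered 0 0
    let high := PySem.List.pyGetD ordered (-1) 0
    if low == high then PySem.Int.toStr low ++ "%"
    else PySem.Int.toStr low ++ "% - " ++ PySem.Int.toStr high ++ "%"

-- ===== PRECONDITION & SPEC =====
def Spec_format_workload_py (value : List Int) (out : String) : Prop := out = format_workload_py_alt value
instance (value : List Int) (out : String) : Decidable (Spec_format_workload_py value out) := by unfold Spec_format_workload_py; infer_instance

-- ===== CLAIM (what is proved, stated in full; the proofs are below) =====
def Claim_equal_format_workload_py : Prop := ∀ (value : List Int), Dom_format_workload_py value → Spec_format_workload_py value (format_workload_py value)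

-- ===== LEMMAS AND PROOFS =====

-- in a (≤)-pairwise list, every member is ≤ the last element
theorem mem_le_getLast (l : List Int) (h : l ≠ []) (y : Int)
    (hp : l.Pairwise (· ≤ ·)) (hy : y ∈ l) : y ≤ l.getLast h := by
  induction l with
  | nil => exact absurd rfl h
  | cons x t ih =>
      cases t with
      | nil => simp at hy ⊢; omega
      | cons z t' =>
          rw [List.getLast_cons (by simp)]
          rcases List.mem_cons.mp hy with rfl | hy'
          · exact le_trans (List.rel_of_pairwise_cons hp (List.getLast_mem _))
              (le_refl _)
          · exact ih (by simp) (List.pairwise_cons.mp hp).2 hy'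

theorem sorted_head_eq_min (x : Int) (t : List Int) (h : PySem.List.sorted (x :: t) (fun y => y) false ≠ []) :
    (PySem.List.sorted (x :: t) (fun y => y) false).headD 0 = t.foldl min x := by
  obtain ⟨m, s, hs⟩ : ∃ m s, PySem.List.sorted (x :: t) (fun y => y) false = m :: s := by
    cases hsort : PySem.List.sorted (x :: t) (fun y => y) false with
    | nil => exact absurd hsort h
    | cons m s => exact ⟨m, s, rfl⟩
  rw [hs]; simp only [List.headD_cons]
  have hperm := PySem.List.sorted_perm (x :: t) (fun y => y) false
  rw [hs] at hperm
  have hminmem : t.foldl min x ∈ x :: t := by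
    exact List.min?_mem List.min?_cons'
  have h1 : m ≤ t.foldl min x :=
    PySem.List.key_head_sorted_le (xs := x :: t) (key := fun y => y) hs _ hminmem
  have hmmem : m ∈ x :: t := hperm.mem_iff.mp (List.mem_cons_self ..)
  have h2 : t.foldl min x ≤ m := by
    have := PySem.List.min?_isMin (xs := x :: t) (key := fun y => y)
      (m := t.foldl min x) (by rw [PySem.List.min?_id_cons]) m hmmem
    simpa using this
  omega

theorem sorted_last_eq_max (x : Int) (t : List Int) (h : PySem.List.sorted (x :: t) (fun y => y) false ≠ []) :
    (PySem.List.sorted (x :: t) (fun y => y) false).getLast h = t.foldl max x := by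
  have hperm := PySem.List.sorted_perm (x :: t) (fun y => y) false
  have hmaxmem : t.foldl max x ∈ x :: t := by
    exact List.max?_mem List.max?_cons'
  have h1 : (PySem.List.sorted (x :: t) (fun y => y) false).getLast h ≤ t.foldl max x := by
    have hm : (PySem.List.sorted (x :: t) (fun y => y) false).getLast h ∈ x :: t :=
      hperm.mem_iff.mp (List.getLast_mem h)
    have := PySem.List.max?_isMax (xs := x :: t) (key := fun y => y)
      (m := t.foldl max x) (by rw [PySem.List.max?_id_cons]) _ hm
    simpa using this
  have h2 : t.foldl max x ≤ (PySem.List.sorted (x :: t) (fun y => y) false).getLast h := by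
    refine mem_le_getLast _ h _ ?_ (hperm.mem_iff.mpr hmaxmem)
    simpa using PySem.List.sorted_pairwise (xs := x :: t) (key := fun y => y)
  omega

-- ===== VERDICT (by name: the statement is the Claim_ definition above) =====
theorem format_workload_py_spec : Claim_equal_format_workload_py := by
  intro value _
  unfold Spec_format_workload_py format_workload_py format_workload_py_alt
  cases value with
  | nil => rfl
  | cons x t =>
      have hne : PySem.List.sorted (x :: t) (fun y => y) false ≠ [] := by
        have := PySem.List.length_sorted (xs := x :: t) (key := fun y => y) (rev := false)
        intro hnil; rw [hnil] at this; simp at this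
      simp only [List.isEmpty_cons, List.filter_true, Bool.false_eq_true, if_false,
        PySem.List.min?_id_cons, PySem.List.max?_id_cons,
        List.isEmpty_iff, hne, if_false]
      rw [PySem.List.pyGetD_zero, PySem.List.pyGetD_neg_one _ _ hne,
        sorted_last_eq_max x t hne]
      have : (PySem.List.sorted (x :: t) (fun y => y) false).getD 0 0
          = (PySem.List.sorted (x :: t) (fun y => y) false).headD 0 := by
        cases PySem.List.sorted (x :: t) (fun y => y) false <;> rfl
      rw [this, sorted_head_eq_min x t hne]
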